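-- pv_equiv track=rewrite | github.com/jinpengLei/ctr2021 | utils/data_process.py | remove_unlaw
-- ===== SOURCE A (Python) =====
-- def remove_unlaw(st):
--     res = ""
--     length = len(st) - 2
--     i = 0
--     while i < length:
--         if st[i: i + 3] == "^,^":
--             i = i + 2
--         else:
--             res = res + st[i]
--         i = i + 1
--     while i < len(st):
--         res = res + st[i]
--         i = i + 1
--     res = res.replace('^', '')
--     return res
-- ===== SOURCE B (Python) =====
-- def remove_unlaw(st):
--     return st.replace("^,^", "").replace("^", "")
-- ===== Notes on version B (the rewrite author's own statement) =====
-- stated objective: simpler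
-- what changed: Replaced the manual index-scanning while loops with char-by-char string accumulation by two chained str.replace calls (remove "^,^" first, then lone "^").
import Mathlib
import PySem

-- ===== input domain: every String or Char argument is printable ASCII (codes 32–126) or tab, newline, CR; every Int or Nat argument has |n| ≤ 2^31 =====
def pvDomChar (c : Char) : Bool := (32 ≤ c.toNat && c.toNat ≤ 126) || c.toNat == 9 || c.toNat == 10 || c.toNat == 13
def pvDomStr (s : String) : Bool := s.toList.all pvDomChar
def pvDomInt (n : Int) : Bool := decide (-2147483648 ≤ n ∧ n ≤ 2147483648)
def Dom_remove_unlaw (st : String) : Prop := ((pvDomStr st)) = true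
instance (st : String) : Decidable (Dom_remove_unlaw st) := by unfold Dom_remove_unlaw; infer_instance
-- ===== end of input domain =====

-- B replaces A's manual index-scanning loops and char-by-char accumulation with two chained
-- str.replace calls ("^,^" first, then "^"); objective: simpler.

-- ===== PORT A =====
-- second while loop of A: copies st[i:] char by char
def remove_unlaw_loop2 (cs : List Char) (i : Nat) (res : List Char) : List Char :=
  if i < cs.length then
    -- st[i] is in range here, so the .getD default is never used
    remove_unlaw_loop2 cs (i + 1) (res ++ [(PySem.List.pyGet? cs (i : Int)).getD ' '])
  else res
termination_by cs.length - i

-- first while loop of A: i < len(st) - 2, skipping "^,^" occurrences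
def remove_unlaw_loop1 (cs : List Char) (i : Nat) (res : List Char) : List Char :=
  if _h : (i : Int) < (cs.length : Int) - 2 then
    if PySem.List.slice cs (some (i : Int)) (some ((i : Int) + 3)) = ['^', ',', '^'] then
      remove_unlaw_loop1 cs (i + 3) res          -- i = i + 2, then i = i + 1
    else
      remove_unlaw_loop1 cs (i + 1) (res ++ [(PySem.List.pyGet? cs (i : Int)).getD ' '])
  else
    remove_unlaw_loop2 cs i res
termination_by cs.length - i
decreasing_by all_goals omega

def remove_unlaw (st : String) : String :=
  String.ofList (PySem.Chars.replace (remove_unlaw_loop1 st.toList 0 []) ['^'] [])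

-- ===== PORT B =====
def remove_unlaw_alt (st : String) : String :=
  PySem.Str.replace (PySem.Str.replace st "^,^" "") "^" ""

-- ===== PRECONDITION & SPEC =====
def Spec_remove_unlaw (st : String) (out : String) : Prop := out = remove_unlaw_alt st
instance (st : String) (out : String) : Decidable (Spec_remove_unlaw st out) := by unfold Spec_remove_unlaw; infer_instance

-- ===== CLAIM (what is proved, stated in full; the proofs are below) =====
def Claim_equal_remove_unlaw : Prop := ∀ (st : String), Dom_remove_unlaw st → Spec_remove_unlaw st (remove_unlaw st)

-- ===== LEMMAS AND PROOFS =====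

-- reference form of "remove all non-overlapping occurrences of ^,^ left to right"
def strip3 : List Char → List Char
  | [] => []
  | c :: t =>
    if (['^', ',', '^'] : List Char).isPrefixOf (c :: t) then strip3 (t.drop 2)
    else c :: strip3 t
termination_by l => l.length
decreasing_by all_goals (simp only [List.length_drop, List.length_cons]; omega)

theorem strip3_short (l : List Char) (h : l.length < 3) : strip3 l = l := by
  match l, h with
  | [], _ => simp [strip3]
  | [a], _ => simp [strip3, List.isPrefixOf]
  | [a, b], _ => simp [strip3, List.isPrefixOf]

theorem loop2_eq (cs : List Char) (i : Nat) (res : List Char) :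
    remove_unlaw_loop2 cs i res = res ++ cs.drop i := by
  fun_induction remove_unlaw_loop2 cs i res with
  | case1 i res h ih =>
    rw [ih]
    rw [List.drop_eq_getElem_cons h]
    simp [PySem.List.pyGet?_natCast, List.getElem?_eq_getElem h]
  | case2 i res h =>
    rw [List.drop_of_length_le (Nat.le_of_not_lt h)]
    simp

theorem loop1_eq (cs : List Char) (i : Nat) (res : List Char) :
    remove_unlaw_loop1 cs i res = res ++ strip3 (cs.drop i) := by
  fun_induction remove_unlaw_loop1 cs i res with
  | case1 i res h hm ih =>
    rw [ih]
    have hlen : 3 ≤ (cs.drop i).length := by simp; omega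
    rw [show ((i : Int) + 3) = ((i + 3 : Nat) : Int) by push_cast; ring,
       PySem.List.slice_natCast] at hm
    have hd : cs.drop i = '^' :: ',' :: '^' :: cs.drop (i + 3) := by
      have : cs.drop i = (cs.drop i).take 3 ++ (cs.drop i).drop 3 := by simp
      rw [show (i : Nat) + 3 - i = 3 by omega] at hm
      rw [this, hm]
      simp [List.drop_drop]
    rw [hd]
    have : strip3 ('^' :: ',' :: '^' :: cs.drop (i + 3)) = strip3 (cs.drop (i + 3)) := by
      rw [strip3]
      simp [List.isPrefixOf]
    rw [this]
  | case2 i res h hm ih =>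
    rw [ih]
    have hlen : 3 ≤ (cs.drop i).length := by simp; omega
    have hi : i < cs.length := by omega
    rw [show ((i : Int) + 3) = ((i + 3 : Nat) : Int) by push_cast; ring,
       PySem.List.slice_natCast] at hm
    rw [show (i : Nat) + 3 - i = 3 by omega] at hm
    rw [List.drop_eq_getElem_cons hi]
    have hnp : ¬ (['^', ',', '^'] : List Char).isPrefixOf (cs[i] :: cs.drop (i + 1)) := by
      intro hp
      apply hm
      have hpre : (['^', ',', '^'] : List Char) <+: cs.drop i := by
        rw [List.drop_eq_getElem_cons hi]; exact List.isPrefixOf_iff_prefix.mp hp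
      obtain ⟨s, hs⟩ := hpre
      rw [← hs]
      simp
    rw [strip3, if_neg hnp]
    simp [PySem.List.pyGet?_natCast, List.getElem?_eq_getElem hi]
  | case3 i res h =>
    rw [loop2_eq]
    rw [strip3_short _ (by simp; omega)]

theorem go_eq (fuel : Nat) (l acc : List Char) (h : l.length ≤ fuel) :
    PySem.Chars.replace.go ['^', ',', '^'] [] fuel l acc = acc.reverse ++ strip3 l := by
  induction fuel generalizing l acc with
  | zero =>
    have : l = [] := List.eq_nil_of_length_eq_zero (by omega)
    subst this
    simp [PySem.Chars.replace.go, strip3]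
  | succ n ih =>
    match l with
    | [] => simp [PySem.Chars.replace.go, strip3]
    | c :: t =>
      rw [PySem.Chars.replace.go]
      by_cases hp : (['^', ',', '^'] : List Char).isPrefixOf (c :: t)
      · rw [if_pos hp, strip3, if_pos hp]
        have : List.drop (List.length ['^', ',', '^']) (c :: t) = t.drop 2 := by
          simp
        rw [this]
        simp only [List.reverse_nil, List.nil_append]
        exact ih _ _ (by simp at h ⊢; omega)
      · rw [if_neg hp, strip3, if_neg hp]
        rw [ih _ _ (by simp at h ⊢; omega)]
        simp

theorem replace_eq_strip3 (cs : List Char) :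
    PySem.Chars.replace cs ['^', ',', '^'] [] = strip3 cs := by
  rw [PySem.Chars.replace]
  simp only [List.isEmpty_cons]
  exact go_eq cs.length cs [] le_rfl

-- ===== VERDICT (by name: the statement is the Claim_ definition above) =====
theorem remove_unlaw_spec : Claim_equal_remove_unlaw := by
  intro st _
  unfold Spec_remove_unlaw remove_unlaw remove_unlaw_alt
  rw [loop1_eq]
  simp only [List.nil_append, List.drop_zero]
  rw [PySem.Str.replace, PySem.Str.replace]
  rw [String.toList_ofList]
  congr 1
  rw [show ("^,^".toList) = ['^', ',', '^'] from rfl, show ("".toList) = ([] : List Char) from rfl,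
     show ("^".toList) = ['^'] from rfl, replace_eq_strip3]
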